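-- pv_equiv track=rewrite | github.com/peterthomson2000/Worst-Case-Holdem | worst_case_holdem.py | _is_broken_pair
-- ===== SOURCE A (Python) =====
-- from collections import Counter
-- from typing import List, Sequence, Tuple
--
-- def _is_broken_pair(ranks: Sequence[int]) -> bool:
--     """Broken Pair: a true low pair (<= 9) and three distinct kickers.
--
--     This makes Broken Pair behave more like "One Pair" in standard poker odds,
--     but only for lower-ranked pairs. High pairs will tend to be absorbed by
--     other patterns or by the LOW_CARD catch-all.
--     """
--
--     counts = Counter(ranks)
--     # Exactly one pair and three singletons.
--     pair_ranks = [r for r, c in counts.items() if c == 2]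
--     if len(pair_ranks) != 1:
--         return False
--
--     pair_rank = pair_ranks[0]
--     # Restrict to "low-ish" pairs to keep the Worst Case flavor.
--     if pair_rank > 9:
--         return False
--
--     # Ensure the remaining three cards are all different ranks.
--     if sorted(counts.values(), reverse=True) != [2, 1, 1, 1]:
--         return False
--
--     return True
-- ===== SOURCE B (Python) =====
-- def _is_broken_pair(ranks):
--     """Broken Pair by direct pairwise comparison: a 5-card hand has a unique low
--     pair and three distinct kickers iff exactly one unordered pair of positions
--     holds equal ranks -- no counting table or sort needed."""
--     if len(ranks) != 5:
--         return False
--     dups = []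
--     rest = list(ranks)
--     while rest:
--         x = rest[0]
--         rest = rest[1:]
--         dups += [x for y in rest if y == x]
--     return len(dups) == 1 and dups[0] <= 9
-- ===== Notes on version B (the rewrite author's own statement) =====
-- stated objective: alternative
-- what changed: B drops the frequency table entirely: after a length-5 guard (a non-5-card hand can never have counts {2,1,1,1}) it compares every position with every later position, collecting the left rank of each equal pair, and answers true iff exactly one equal position-pair exists and its rank is <= 9; correctness rests on sum over ranks of C(count,2) = 1 together with length 5 being equivalent to the {2,1,1,1} count shape.
import Mathlib
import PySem

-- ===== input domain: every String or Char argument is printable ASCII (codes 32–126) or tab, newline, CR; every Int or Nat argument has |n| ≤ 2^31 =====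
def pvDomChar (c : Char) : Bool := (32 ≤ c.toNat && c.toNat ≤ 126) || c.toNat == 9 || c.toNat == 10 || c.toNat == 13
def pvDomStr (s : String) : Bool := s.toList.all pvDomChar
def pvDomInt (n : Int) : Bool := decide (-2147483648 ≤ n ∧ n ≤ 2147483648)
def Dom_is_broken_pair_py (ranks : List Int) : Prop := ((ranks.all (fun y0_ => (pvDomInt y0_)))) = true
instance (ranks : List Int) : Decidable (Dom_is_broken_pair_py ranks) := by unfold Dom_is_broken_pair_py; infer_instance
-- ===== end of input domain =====

-- B replaces A's Counter shape check by a direct all-pairs duplicate scan on a 5-card hand (same return value; no speed claim).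

-- ===== PORT A =====
def is_broken_pair_py (ranks : List Int) : Bool :=
  let counts := PySem.Dict.counter ranks
  let pair_ranks := (counts.items.filter (fun p => p.2 == 2)).map (fun p => p.1)
  if pair_ranks.length ≠ 1 then false
  else
    -- pair_ranks[0]: exact, the list has length 1 in this branch
    let pair_rank : Int := (PySem.List.pyGet? pair_ranks 0).getD 0
    if pair_rank > 9 then false
    else if PySem.List.sorted counts.values (fun x => x) true ≠ [2, 1, 1, 1] then false
    else true

-- ===== PORT B =====
-- Source B's while loop: x = rest[0]; rest = rest[1:]; dups += [x for y in rest if y == x]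
def pvDups : List Int → List Int
  | [] => []
  | x :: rest => (rest.filter (fun y => y == x)).map (fun _ => x) ++ pvDups rest

def is_broken_pair_py_alt (ranks : List Int) : Bool :=
  if (ranks.length : Int) ≠ 5 then false
  else
    let dups := pvDups ranks
    -- dups[0]: exact, the list is nonempty when its length is 1 (Python's `and` short-circuits)
    decide (dups.length = 1) && decide ((PySem.List.pyGet? dups 0).getD 0 ≤ 9)

-- ===== PRECONDITION & SPEC =====
def Spec_is_broken_pair_py (ranks : List Int) (out : Bool) : Prop := out = is_broken_pair_py_alt ranks
instance (ranks : List Int) (out : Bool) : Decidable (Spec_is_broken_pair_py ranks out) := by unfold Spec_is_broken_pair_py; infer_instance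

-- ===== CLAIM (what is proved, stated in full; the proofs are below) =====
def Claim_equal_is_broken_pair_py : Prop := ∀ (ranks : List Int), Dom_is_broken_pair_py ranks → Spec_is_broken_pair_py ranks (is_broken_pair_py ranks)

-- ===== LEMMAS AND PROOFS =====

-- sorted(v, reverse=True) == [2,1,1,1]  ↔  v is a permutation of {2,1,1,1}
theorem sorted_desc_check (v : List Int) :
    PySem.List.sorted v (fun x => x) true = [2, 1, 1, 1] ↔ v.Perm [2, 1, 1, 1] := by
  have hp := PySem.List.sorted_perm v (fun x => x) true
  constructor
  · intro h
    rw [h] at hp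
    exact hp.symm
  · intro h
    exact List.Perm.eq_of_pairwise (le := fun a b => b ≤ a)
      (fun a b _ _ h1 h2 => le_antisymm h2 h1)
      (PySem.List.sorted_pairwise_rev v (fun x => x)) (by decide)
      (hp.trans h)

-- [r for r, c in pairs if c == 2] over an explicit key list
theorem pair_list (K : List Int) (cf : Int → Int) :
    ((K.map (fun k => (k, cf k))).filter (fun p => p.2 == 2)).map (fun p => p.1)
      = K.filter (fun k => cf k == 2) := by
  induction K with
  | nil => simp
  | cons a as ih =>
    by_cases h : (cf a == 2) = true <;>
      simp [h, ih]

-- the number of equal position-pairs collected by pvDups is Σ_k C(count k, 2)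
theorem pvDups_length (l : List Int) :
    (pvDups l).length = ∑ k ∈ l.toFinset, ((l.count k).choose 2) := by
  induction l with
  | nil => simp [pvDups]
  | cons x xs ih =>
    have hins : insert x xs.toFinset = insert x (xs.toFinset.erase x) := by
      ext a; simp [Finset.mem_insert, Finset.mem_erase]; tauto
    have hxni : x ∉ xs.toFinset.erase x := Finset.notMem_erase x _
    have hcount : ∀ k, k ≠ x → (x :: xs).count k = xs.count k := by
      intro k hk
      simp [List.count_cons, hk.symm]
    have hcx : (x :: xs).count x = xs.count x + 1 := by simp
    have hsum' : ∑ k ∈ (x :: xs).toFinset, ((x :: xs).count k).choose 2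
        = ((xs.count x + 1).choose 2) + ∑ k ∈ xs.toFinset.erase x, ((xs.count k).choose 2) := by
      rw [List.toFinset_cons, hins, Finset.sum_insert hxni, hcx]
      congr 1
      apply Finset.sum_congr rfl
      intro k hk
      rw [hcount k (Finset.mem_erase.mp hk).1]
    have hchoose : (xs.count x + 1).choose 2 = (xs.count x).choose 2 + xs.count x := by
      rw [Nat.choose_succ_succ]
      simp [Nat.choose_one_right, Nat.add_comm]
    have hsplit : ∑ k ∈ xs.toFinset, ((xs.count k).choose 2)
        = (if x ∈ xs.toFinset then (xs.count x).choose 2 else 0)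
            + ∑ k ∈ xs.toFinset.erase x, ((xs.count k).choose 2) := by
      by_cases hx : x ∈ xs.toFinset
      · rw [if_pos hx, ← Finset.add_sum_erase _ _ hx]
      · rw [if_neg hx, Finset.erase_eq_of_notMem hx, Nat.zero_add]
    have hlen : (pvDups (x :: xs)).length = xs.count x + (pvDups xs).length := by
      simp [pvDups, List.count_eq_countP, List.countP_eq_length_filter]
    have h02 : Nat.choose 0 2 = 0 := rfl
    by_cases hx : x ∈ xs.toFinset
    · rw [hlen, ih, hsum', hchoose, hsplit, if_pos hx]; omega
    · have hc0 : xs.count x = 0 := by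
        rw [List.count_eq_zero]
        simpa using hx
      rw [hlen, ih, hsum', hchoose, hsplit, if_neg hx, hc0]; omega
  
-- every collected duplicate occurs at least twice in the list
theorem pvDups_mem (l : List Int) (y : Int) (hy : y ∈ pvDups l) :
    2 ≤ l.count y ∧ y ∈ l := by
  induction l with
  | nil => simp [pvDups] at hy
  | cons x xs ih =>
    rw [pvDups, List.mem_append] at hy
    rcases hy with h | h
    · obtain ⟨z, hz, rfl⟩ := List.mem_map.mp h
      have hzx : z ∈ xs ∧ (z == x) = true := List.mem_filter.mp hz
      have : x ∈ xs := by
        have := hzx.2; simp at this; rw [← this]; exact hzx.1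
      constructor
      · have h1 : 1 ≤ xs.count x := List.count_pos_iff.mpr this
        rw [List.count_cons_self]; omega
      · exact List.mem_cons_self
    · obtain ⟨h1, h2⟩ := ih h
      refine ⟨?_, List.mem_cons_of_mem _ h2⟩
      have : xs.count y ≤ (x :: xs).count y := by
        simp [List.count_cons]
      omega

-- counts of 1s and 2s determine the sums of a {1,2}-valued list
theorem sum_one_two (V : List ℕ) (h : ∀ v ∈ V, v = 1 ∨ v = 2) :
    (V.map (fun v => v.choose 2)).sum = V.count 2
      ∧ V.sum = V.count 1 + 2 * V.count 2 := by
  induction V with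
  | nil => simp
  | cons v vs ih =>
    obtain ⟨ih1, ih2⟩ := ih (fun w hw => h w (List.mem_cons_of_mem _ hw))
    rcases h v List.mem_cons_self with rfl | rfl <;>
      simp [List.count_cons, ih1, ih2] <;> omega

-- the decisive combinatorial fact: for positive counts, Σ C(c,2) = 1 and Σ c = 5 ⇔ counts ≈ {2,1,1,1}
theorem char_counts (V : List ℕ) (hpos : ∀ v ∈ V, 1 ≤ v) :
    ((V.map (fun v => v.choose 2)).sum = 1 ∧ V.sum = 5) ↔ V.Perm [2, 1, 1, 1] := by
  constructor
  · rintro ⟨h1, h2⟩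
    have h12 : ∀ v ∈ V, v = 1 ∨ v = 2 := by
      intro v hv
      by_contra hc
      push_neg at hc
      have h3 : 3 ≤ v := by
        have := hpos v hv; omega
      have hle : v.choose 2 ≤ (V.map (fun v => v.choose 2)).sum :=
        List.single_le_sum (fun _ _ => Nat.zero_le _) _ (List.mem_map_of_mem hv)
      have : 3 ≤ v.choose 2 := by
        calc 3 = Nat.choose 3 2 := by decide
        _ ≤ v.choose 2 := Nat.choose_le_choose 2 h3
      omega
    obtain ⟨hs1, hs2⟩ := sum_one_two V h12
    have hc2 : V.count 2 = 1 := by omega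
    have hc1 : V.count 1 = 3 := by omega
    rw [List.perm_iff_count]
    intro a
    by_cases ha1 : a = 1
    · subst ha1; simpa using hc1
    · by_cases ha2 : a = 2
      · subst ha2; simpa using hc2
      · have : a ∉ V := fun hmem => by rcases h12 a hmem with h | h <;> omega
        rw [List.count_eq_zero.mpr this]
        have : a ∉ ([2, 1, 1, 1] : List ℕ) := by
          simp; omega
        rw [List.count_eq_zero.mpr this]
  · intro hp
    constructor
    · have := (hp.map (fun v => v.choose 2)).sum_eq
      simpa using this
    · have := hp.sum_eq
      simpa using this

-- casting a ℕ-list to ℤ preserves "is a permutation of [2,1,1,1]"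
theorem cast_perm (V : List ℕ) :
    (V.map (fun v : ℕ => (v : Int))).Perm [2, 1, 1, 1] ↔ V.Perm [2, 1, 1, 1] := by
  constructor
  · intro h
    rw [List.perm_iff_count]
    intro a
    have hinj : Function.Injective (fun v : ℕ => (v : Int)) := fun a b => by simp
    have h1 : V.count a = (V.map (fun v : ℕ => (v : Int))).count ((a : ℕ) : Int) :=
      (List.count_map_of_injective _ _ hinj a).symm
    rw [h1, h.count_eq]
    by_cases ha : a < 3
    · interval_cases a <;> decide
    · have h2 : (a : Int) ∉ ([2, 1, 1, 1] : List Int) := by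
        simp
        omega
      have h3 : a ∉ ([2, 1, 1, 1] : List ℕ) := by
        simp
        omega
      rw [List.count_eq_zero.mpr h2, List.count_eq_zero.mpr h3]
  · intro h
    have := h.map (fun v : ℕ => (v : Int))
    simpa using this

-- sum over Set.ofList = sum over toFinset
theorem sum_ofList (l : List Int) (f : Int → ℕ) :
    ((PySem.Set.ofList l).map f).sum = ∑ k ∈ l.toFinset, f k := by
  have hnd : (PySem.Set.ofList l).Nodup := PySem.Set.nodup_ofList l
  have hfin : (PySem.Set.ofList l).toFinset = l.toFinset := by
    ext a
    simp [List.mem_toFinset, PySem.Set.mem_ofList]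
  rw [← List.sum_toFinset f hnd, hfin]

theorem is_broken_pair_py_eq (ranks : List Int) :
    is_broken_pair_py ranks = is_broken_pair_py_alt ranks := by
  have hitems : (PySem.Dict.counter ranks).items
      = (PySem.Set.ofList ranks).map (fun k => (k, (ranks.count k : Int))) :=
    PySem.Dict.items_counter ranks
  have hvalues : (PySem.Dict.counter ranks).values
      = (PySem.Set.ofList ranks).map (fun k => (ranks.count k : Int)) := by
    simp [PySem.Dict.values, PySem.Dict.items_counter, List.map_map]
  set K := PySem.Set.ofList ranks with hKdef
  set VN := K.map (fun k => ranks.count k) with hVNdef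
  have hVA : K.map (fun k => (ranks.count k : Int)) = VN.map (fun v : ℕ => (v : Int)) := by
    rw [hVNdef, List.map_map]
    rfl
  have hpos : ∀ v ∈ VN, 1 ≤ v := by
    intro v hv
    obtain ⟨k, hk, rfl⟩ := List.mem_map.mp hv
    exact List.count_pos_iff.mpr ((PySem.Set.mem_ofList ranks k).mp hk)
  have hsum : VN.sum = ranks.length := by
    rw [hVNdef, hKdef, sum_ofList]
    have := Multiset.toFinset_sum_count_eq (↑ranks : Multiset Int)
    simpa using this
  have hchooseSum : (VN.map (fun v => v.choose 2)).sum = (pvDups ranks).length := by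
    rw [hVNdef, List.map_map]
    have : ((fun v => v.choose 2) ∘ fun k => ranks.count k)
        = fun k => (ranks.count k).choose 2 := rfl
    rw [this, hKdef, sum_ofList, pvDups_length]
  by_cases hP : VN.Perm [2, 1, 1, 1]
  · -- the count multiset is {2,1,1,1}: both sides reduce to "the unique pair rank ≤ 9"
    have hPz : (K.map (fun k => (ranks.count k : Int))).Perm [2, 1, 1, 1] := by
      rw [hVA]; exact (cast_perm VN).mpr hP
    have hlen5 : ranks.length = 5 := by
      rw [← hsum, hP.sum_eq]; rfl
    have hd1 : (pvDups ranks).length = 1 := by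
      rw [← hchooseSum, (hP.map (fun v => v.choose 2)).sum_eq]; rfl
    have hF1 : (K.filter (fun k => ((ranks.count k : Int)) == 2)).length = 1 := by
      have h1 : List.count (2 : Int) (K.map (fun k => (ranks.count k : Int)))
          = (K.filter (fun k => ((ranks.count k : Int)) == 2)).length := by
        rw [List.count_eq_countP, List.countP_map, List.countP_eq_length_filter]
        rfl
      have h2 : List.count (2 : Int) (K.map (fun k => (ranks.count k : Int))) = 1 := by
        rw [hPz.count_eq]; decide
      omega
    obtain ⟨b, hb⟩ := List.length_eq_one_iff.mp hF1
    have hbcnt : ranks.count b = 2 := by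
      have hbmem : b ∈ K.filter (fun k => ((ranks.count k : Int)) == 2) := by
        rw [hb]; exact List.mem_cons_self
      have := (List.mem_filter.mp hbmem).2
      simp at this
      exact_mod_cast this
    obtain ⟨d, hd⟩ := List.length_eq_one_iff.mp hd1
    have hdmem : d ∈ pvDups ranks := by rw [hd]; exact List.mem_cons_self
    obtain ⟨hd2, hdl⟩ := pvDups_mem ranks d hdmem
    have hdK : d ∈ K := (PySem.Set.mem_ofList ranks d).mpr hdl
    have hdcnt : ranks.count d = 2 := by
      have : ranks.count d ∈ VN := by
        rw [hVNdef]; exact List.mem_map_of_mem hdK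
      have := hP.mem_iff.mp this
      simp at this
      omega
    have hdb : d = b := by
      have : d ∈ K.filter (fun k => ((ranks.count k : Int)) == 2) :=
        List.mem_filter.mpr ⟨hdK, by simp [hdcnt]⟩
      rw [hb] at this
      simpa using this
    have hsorted : PySem.List.sorted (K.map (fun k => (ranks.count k : Int)))
        (fun x => x) true = [2, 1, 1, 1] := (sorted_desc_check _).mpr hPz
    have hA : is_broken_pair_py ranks = decide (b ≤ 9) := by
      simp only [is_broken_pair_py]
      rw [hitems, hvalues, pair_list, hb, hsorted]
      simp [PySem.List.pyGet?, PySem.List.pyIdx?]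
      by_cases h9 : 9 < b <;> simp [h9] <;> omega
    have hB : is_broken_pair_py_alt ranks = decide (b ≤ 9) := by
      simp only [is_broken_pair_py_alt]
      rw [if_neg (by rw [hlen5]; simp)]
      rw [hd, hdb]
      simp [PySem.List.pyGet?, PySem.List.pyIdx?]
    rw [hA, hB]
  · -- the count multiset is not {2,1,1,1}: both sides return False
    have hA : is_broken_pair_py ranks = false := by
      simp only [is_broken_pair_py]
      rw [hitems, hvalues, pair_list]
      split_ifs with h1 h2 h3
      · rfl
      · rfl
      · rfl
      · -- the sorted-values check passed: the counts would be a permutation of {2,1,1,1}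
        exfalso
        apply hP
        rw [← cast_perm VN, ← hVA]
        exact (sorted_desc_check _).mp (not_not.mp h3)
    have hB : is_broken_pair_py_alt ranks = false := by
      simp only [is_broken_pair_py_alt]
      by_cases hl : (ranks.length : Int) ≠ 5
      · rw [if_pos hl]
      · rw [if_neg hl]
        have hl5 : ranks.length = 5 := by exact_mod_cast not_not.mp hl
        have hdne : (pvDups ranks).length ≠ 1 := by
          intro h1
          exact hP ((char_counts VN hpos).mp ⟨hchooseSum.trans h1, hsum.trans hl5⟩)
        simp [hdne]
    rw [hA, hB]

-- ===== VERDICT (by name: the statement is the Claim_ definition above) =====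
theorem is_broken_pair_py_spec : Claim_equal_is_broken_pair_py := by
  intro ranks _
  unfold Spec_is_broken_pair_py
  exact is_broken_pair_py_eq ranks
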